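-- pv_equiv track=rewrite | github.com/fatihaltiok/Agentus-Timus | tools/planner/tool.py | _pick_entry_script
-- ===== SOURCE A (Python) =====
-- from typing import Any, Dict, List, Optional
--
-- def _pick_entry_script(script_names: List[str]) -> Optional[str]:
--     if not script_names:
--         return None
--
--     preferred = ("main.py", "run.py", "entrypoint.py")
--     names_set = set(script_names)
--     for candidate in preferred:
--         if candidate in names_set:
--             return candidate
--
--     sorted_names = sorted(script_names)
--     for suffix in (".py", ".sh", ".bash"):
--         for name in sorted_names:
--             if name.endswith(suffix):
--                 return name
--     return sorted_names[0]
-- ===== SOURCE B (Python) =====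
-- from typing import List, Optional
--
--
-- def _pick_entry_script(script_names: List[str]) -> Optional[str]:
--     if not script_names:
--         return None
--
--     preferred = ("main.py", "run.py", "entrypoint.py")
--     suffixes = (".py", ".sh", ".bash")
--
--     def rank(name):
--         pref = preferred.index(name) if name in preferred else 3
--         suf = next((i for i, s in enumerate(suffixes) if name.endswith(s)), 3)
--         return str(pref) + str(suf) + name
--
--     return min(script_names, key=rank)
-- ===== Notes on version B (the rewrite author's own statement) =====
-- stated objective: idiomatic
-- what changed: Replaces the preferred-name loop over a set, the sort, the nested suffix scan and the sorted[0] fallback by a single min over one composite key (preferred rank, suffix rank, name).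
import Mathlib
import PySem

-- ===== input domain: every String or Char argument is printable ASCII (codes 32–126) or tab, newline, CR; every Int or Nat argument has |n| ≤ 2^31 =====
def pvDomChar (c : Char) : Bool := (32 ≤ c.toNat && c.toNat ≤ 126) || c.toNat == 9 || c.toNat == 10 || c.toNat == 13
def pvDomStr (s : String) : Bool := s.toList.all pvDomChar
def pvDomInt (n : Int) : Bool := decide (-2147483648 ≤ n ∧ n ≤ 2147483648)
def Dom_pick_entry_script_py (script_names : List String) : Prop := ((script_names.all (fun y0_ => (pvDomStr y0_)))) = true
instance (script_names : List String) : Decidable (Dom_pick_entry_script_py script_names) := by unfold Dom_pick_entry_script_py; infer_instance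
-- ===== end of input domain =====

-- B replaces A's preferred-loop + sort + nested suffix scan + fallback by one min over a composite key (idiomatic, same result).


-- ===== PORT A =====
def pick_entry_script_py (script_names : List String) : Option String :=
  if script_names = [] then none
  else
    let names_set := PySem.Set.ofList script_names
    if names_set.contains "main.py" then some "main.py"
    else if names_set.contains "run.py" then some "run.py"
    else if names_set.contains "entrypoint.py" then some "entrypoint.py"
    else
      let sorted_names := PySem.List.sorted script_names (fun s => s)
      match sorted_names.find? (fun n => PySem.Str.endswith n ".py") with
      | some n => some n
      | none =>
        match sorted_names.find? (fun n => PySem.Str.endswith n ".sh") with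
        | some n => some n
        | none =>
          match sorted_names.find? (fun n => PySem.Str.endswith n ".bash") with
          | some n => some n
          | none => PySem.List.pyGet? sorted_names 0

-- ===== PORT B =====
-- preferred.index(name) if name in preferred else 3
def pvPref (name : String) : Nat :=
  if name = "main.py" then 0 else if name = "run.py" then 1 else if name = "entrypoint.py" then 2 else 3

-- next((i for i, s in enumerate(suffixes) if name.endswith(s)), 3)
def pvSuf (name : String) : Nat :=
  if PySem.Str.endswith name ".py" then 0
  else if PySem.Str.endswith name ".sh" then 1
  else if PySem.Str.endswith name ".bash" then 2 else 3

-- str(n) for a one-digit n (pvPref/pvSuf are always 0..3)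
def pvDigit (n : Nat) : Char := Char.ofNat (48 + n)

-- rank(name): the Python key string str(pref) + str(suf) + name, compared as Python compares str
def pvKey (name : String) : String :=
  String.ofList (pvDigit (pvPref name) :: pvDigit (pvSuf name) :: name.toList)

def pick_entry_script_py_alt (script_names : List String) : Option String :=
  if script_names = [] then none
  else PySem.List.min? script_names pvKey

-- ===== PRECONDITION & SPEC =====
def Spec_pick_entry_script_py (script_names : List String) (out : Option String) : Prop := out = pick_entry_script_py_alt script_names
instance (script_names : List String) (out : Option String) : Decidable (Spec_pick_entry_script_py script_names out) := by unfold Spec_pick_entry_script_py; infer_instance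

-- ===== CLAIM (what is proved, stated in full; the proofs are below) =====
def Claim_equal_pick_entry_script_py : Prop := ∀ (script_names : List String), Dom_pick_entry_script_py script_names → Spec_pick_entry_script_py script_names (pick_entry_script_py script_names)

-- ===== LEMMAS AND PROOFS =====

lemma pv_key_le2 (a b : String) (c1 c2 d1 d2 : Char) :
    String.ofList (c1 :: c2 :: a.toList) ≤ String.ofList (d1 :: d2 :: b.toList) ↔
      c1 < d1 ∨ c1 = d1 ∧ (c2 < d2 ∨ c2 = d2 ∧ a ≤ b) := by
  constructor
  · intro h
    rcases lt_or_eq_of_le h with hlt | heq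
    · rw [String.lt_iff_toList_lt, String.toList_ofList, String.toList_ofList,
        List.cons_lt_cons_iff] at hlt
      rcases hlt with hcd | ⟨hcd, hlt⟩
      · exact Or.inl hcd
      · rw [List.cons_lt_cons_iff] at hlt
        rcases hlt with hcd2 | ⟨hcd2, hab⟩
        · exact Or.inr ⟨hcd, Or.inl hcd2⟩
        · exact Or.inr ⟨hcd, Or.inr ⟨hcd2, le_of_lt (String.lt_iff_toList_lt.mpr hab)⟩⟩
    · have h2 : c1 :: c2 :: a.toList = d1 :: d2 :: b.toList := by
        have := congrArg String.toList heq
        simpa only [String.toList_ofList] using this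
      obtain ⟨hcd, h2⟩ := List.cons_eq_cons.mp h2
      obtain ⟨hcd2, htl⟩ := List.cons_eq_cons.mp h2
      exact Or.inr ⟨hcd, Or.inr ⟨hcd2, le_of_eq (String.toList_inj.mp htl)⟩⟩
  · intro h
    rcases h with hcd | ⟨hcd, hcd2 | ⟨hcd2, hab⟩⟩
    · refine le_of_lt ?_
      rw [String.lt_iff_toList_lt, String.toList_ofList, String.toList_ofList,
        List.cons_lt_cons_iff]
      exact Or.inl hcd
    · refine le_of_lt ?_
      rw [String.lt_iff_toList_lt, String.toList_ofList, String.toList_ofList,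
        List.cons_lt_cons_iff]
      exact Or.inr ⟨hcd, List.cons_lt_cons_iff.mpr (Or.inl hcd2)⟩
    · rcases lt_or_eq_of_le hab with hlt | heq
      · refine le_of_lt ?_
        rw [String.lt_iff_toList_lt, String.toList_ofList, String.toList_ofList,
          List.cons_lt_cons_iff]
        exact Or.inr ⟨hcd, List.cons_lt_cons_iff.mpr
          (Or.inr ⟨hcd2, String.lt_iff_toList_lt.mp hlt⟩)⟩
      · subst heq; subst hcd; subst hcd2; exact le_refl _

lemma pvPref_le (y : String) : pvPref y ≤ 3 := by unfold pvPref; split_ifs <;> omega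

lemma pvSuf_le (y : String) : pvSuf y ≤ 3 := by unfold pvSuf; split_ifs <;> omega

lemma pvDigit_lt_iff {m n : Nat} (hm : m ≤ 3) (hn : n ≤ 3) :
    pvDigit m < pvDigit n ↔ m < n := by
  interval_cases m <;> interval_cases n <;> simp [pvDigit]

lemma pvDigit_eq_iff {m n : Nat} (hm : m ≤ 3) (hn : n ≤ 3) :
    pvDigit m = pvDigit n ↔ m = n := by
  interval_cases m <;> interval_cases n <;> simp [pvDigit]

lemma pvKey_le_iff (a b : String) :
    pvKey a ≤ pvKey b ↔
      pvPref a < pvPref b ∨ (pvPref a = pvPref b ∧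
        (pvSuf a < pvSuf b ∨ (pvSuf a = pvSuf b ∧ a ≤ b))) := by
  unfold pvKey
  rw [pv_key_le2, pvDigit_lt_iff (pvPref_le a) (pvPref_le b),
    pvDigit_eq_iff (pvPref_le a) (pvPref_le b),
    pvDigit_lt_iff (pvSuf_le a) (pvSuf_le b),
    pvDigit_eq_iff (pvSuf_le a) (pvSuf_le b)]

lemma pvKey_inj {a b : String} (h : pvKey a = pvKey b) : a = b := by
  have h2 := congrArg String.toList h
  simp only [pvKey, String.toList_ofList] at h2
  obtain ⟨-, h2⟩ := List.cons_eq_cons.mp h2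
  obtain ⟨-, h2⟩ := List.cons_eq_cons.mp h2
  exact String.toList_inj.mp h2

lemma pv_min?_cons_some {α κ : Type} [LT κ] [DecidableLT κ] (key : α → κ) (x : α) (t : List α) :
    ∃ m, PySem.List.min? (x :: t) key = some m := by
  suffices h : ∀ (t : List α) (a : α), ∃ m, List.foldl
      (fun acc y =>
        match acc with
        | none => some y
        | some m => if key y < key m then some y else some m)
      (some a) t = some m by
    simpa [PySem.List.min?] using h t x
  intro t
  induction t with
  | nil => exact fun a => ⟨a, rfl⟩
  | cons y t ih =>
    intro a
    simp only [List.foldl_cons]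
    by_cases h : key y < key a
    · simpa [h] using ih y
    · simpa [h] using ih a

-- B returns the (unique) element with minimal key
lemma pv_alt_eq_some {l : List String} {r : String}
    (hmem : r ∈ l) (hmin : ∀ y ∈ l, pvKey r ≤ pvKey y) :
    pick_entry_script_py_alt l = some r := by
  have hne : l ≠ [] := List.ne_nil_of_mem hmem
  obtain ⟨x, t, rfl⟩ := List.exists_cons_of_ne_nil hne
  obtain ⟨m, hm⟩ := pv_min?_cons_some pvKey x t
  have hmd : PySem.List.minD (x :: t) pvKey r = m := by
    simp [PySem.List.minD, hm]
  have hmmem : m ∈ x :: t := hmd ▸ PySem.List.minD_mem _ pvKey r hne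
  have hmle : ∀ y ∈ x :: t, pvKey m ≤ pvKey y := by
    intro y hy
    exact hmd ▸ PySem.List.key_minD_le _ pvKey r hne y hy
  have : m = r := pvKey_inj (le_antisymm (hmle r hmem) (hmin m hmmem))
  simp [pick_entry_script_py_alt, hm, this]

-- find? on a ≤-pairwise list returns an element ≤ every element satisfying the predicate
lemma pv_find_first {p : String → Bool} {l : List String} {r : String}
    (hpair : List.Pairwise (fun a b : String => a ≤ b) l)
    (h : l.find? p = some r) : ∀ y ∈ l, p y = true → r ≤ y := by
  induction l with
  | nil => simp at h
  | cons a t ih =>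
    rcases List.pairwise_cons.mp hpair with ⟨ha, ht⟩
    by_cases hpa : p a = true
    · rw [List.find?_cons_of_pos (h := hpa)] at h
      cases h
      intro y hy _
      rcases List.mem_cons.mp hy with rfl | hy
      · exact le_refl _
      · exact ha y hy
    · have h' : t.find? p = some r := by
        simpa [List.find?_cons, hpa] using h
      intro y hy hpy
      rcases List.mem_cons.mp hy with rfl | hy
      · exact absurd hpy hpa
      · exact ih ht h' y hy hpy

lemma pvSuf_zero {y : String} (h : PySem.Str.endswith y ".py" = true) : pvSuf y = 0 := by
  unfold pvSuf; rw [if_pos h]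

lemma pvSuf_one {y : String} (h1 : PySem.Str.endswith y ".py" = false)
    (h2 : PySem.Str.endswith y ".sh" = true) : pvSuf y = 1 := by
  unfold pvSuf; rw [if_neg (by rw [h1]; simp), if_pos h2]

lemma pvSuf_two {y : String} (h1 : PySem.Str.endswith y ".py" = false)
    (h2 : PySem.Str.endswith y ".sh" = false)
    (h3 : PySem.Str.endswith y ".bash" = true) : pvSuf y = 2 := by
  unfold pvSuf; rw [if_neg (by rw [h1]; simp), if_neg (by rw [h2]; simp), if_pos h3]

lemma pvSuf_three {y : String} (h1 : PySem.Str.endswith y ".py" = false)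
    (h2 : PySem.Str.endswith y ".sh" = false)
    (h3 : PySem.Str.endswith y ".bash" = false) : pvSuf y = 3 := by
  unfold pvSuf
  rw [if_neg (by rw [h1]; simp), if_neg (by rw [h2]; simp), if_neg (by rw [h3]; simp)]

lemma pvSuf_pos {y : String} (h : PySem.Str.endswith y ".py" = false) : 0 < pvSuf y := by
  unfold pvSuf; rw [if_neg (by rw [h]; simp)]; split_ifs <;> omega

lemma pvSuf_gt_one {y : String} (h1 : PySem.Str.endswith y ".py" = false)
    (h2 : PySem.Str.endswith y ".sh" = false) : 1 < pvSuf y := by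
  unfold pvSuf
  rw [if_neg (by rw [h1]; simp), if_neg (by rw [h2]; simp)]; split_ifs <;> omega

theorem pv_main : ∀ (l : List String),
    pick_entry_script_py l = pick_entry_script_py_alt l := by
  intro l
  by_cases hl : l = []
  · simp [pick_entry_script_py, pick_entry_script_py_alt, hl]
  · by_cases h1 : "main.py" ∈ l
    · have halt : pick_entry_script_py_alt l = some "main.py" := by
        refine pv_alt_eq_some h1 ?_
        intro y hy
        rw [pvKey_le_iff]
        by_cases hy1 : y = "main.py"
        · subst hy1; exact Or.inr ⟨rfl, Or.inr ⟨rfl, le_refl _⟩⟩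
        · refine Or.inl ?_
          have h0 : pvPref "main.py" = 0 := rfl
          rw [h0]
          simp only [pvPref, if_neg hy1]
          split_ifs <;> omega
      rw [halt]
      simp [pick_entry_script_py, hl, h1]
    · by_cases h2 : "run.py" ∈ l
      · have halt : pick_entry_script_py_alt l = some "run.py" := by
          refine pv_alt_eq_some h2 ?_
          intro y hy
          rw [pvKey_le_iff]
          by_cases hy2 : y = "run.py"
          · subst hy2; exact Or.inr ⟨rfl, Or.inr ⟨rfl, le_refl _⟩⟩
          · refine Or.inl ?_
            have hy1 : y ≠ "main.py" := fun h => h1 (h ▸ hy)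
            have h0 : pvPref "run.py" = 1 := rfl
            rw [h0]
            simp only [pvPref, if_neg hy1, if_neg hy2]
            split_ifs <;> omega
        rw [halt]
        simp [pick_entry_script_py, hl, h1, h2]
      · by_cases h3 : "entrypoint.py" ∈ l
        · have halt : pick_entry_script_py_alt l = some "entrypoint.py" := by
            refine pv_alt_eq_some h3 ?_
            intro y hy
            rw [pvKey_le_iff]
            by_cases hy3 : y = "entrypoint.py"
            · subst hy3; exact Or.inr ⟨rfl, Or.inr ⟨rfl, le_refl _⟩⟩
            · refine Or.inl ?_
              have hy1 : y ≠ "main.py" := fun h => h1 (h ▸ hy)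
              have hy2 : y ≠ "run.py" := fun h => h2 (h ▸ hy)
              have h0 : pvPref "entrypoint.py" = 2 := rfl
              rw [h0]
              simp only [pvPref, if_neg hy1, if_neg hy2, if_neg hy3]
              omega
          rw [halt]
          simp [pick_entry_script_py, hl, h1, h2, h3]
        · -- no preferred name is present: the suffix scans over the sorted list
          have hpref3 : ∀ y ∈ l, pvPref y = 3 := by
            intro y hy
            have hy1 : y ≠ "main.py" := fun h => h1 (h ▸ hy)
            have hy2 : y ≠ "run.py" := fun h => h2 (h ▸ hy)
            have hy3 : y ≠ "entrypoint.py" := fun h => h3 (h ▸ hy)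
            simp [pvPref, hy1, hy2, hy3]
          set s := PySem.List.sorted l (fun x => x) with hs
          have hperm : s.Perm l := PySem.List.sorted_perm l (fun x => x) false
          have hpair : List.Pairwise (fun a b : String => a ≤ b) s :=
            PySem.List.sorted_pairwise l (fun x => x)
          have hA : pick_entry_script_py l =
              (match s.find? (fun n => PySem.Str.endswith n ".py") with
              | some n => some n
              | none =>
                match s.find? (fun n => PySem.Str.endswith n ".sh") with
                | some n => some n
                | none =>
                  match s.find? (fun n => PySem.Str.endswith n ".bash") with
                  | some n => some n
                  | none => PySem.List.pyGet? s 0) := by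
            simp [pick_entry_script_py, hl, h1, h2, h3, hs]
          rw [hA]
          cases hf1 : s.find? (fun n => PySem.Str.endswith n ".py") with
          | some r =>
            have hrmem : r ∈ l := hperm.mem_iff.mp (List.mem_of_find?_eq_some hf1)
            have hrpy : PySem.Str.endswith r ".py" = true := by simpa using List.find?_some hf1
            have hsufr : pvSuf r = 0 := pvSuf_zero hrpy
            refine (pv_alt_eq_some hrmem ?_).symm
            intro y hy
            rw [pvKey_le_iff]
            refine Or.inr ⟨(hpref3 r hrmem).trans (hpref3 y hy).symm, ?_⟩
            by_cases hypy : PySem.Str.endswith y ".py" = true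
            · refine Or.inr ⟨by rw [hsufr, pvSuf_zero hypy], ?_⟩
              exact pv_find_first hpair hf1 y (hperm.mem_iff.mpr hy) hypy
            · refine Or.inl ?_
              rw [hsufr]
              exact pvSuf_pos (Bool.eq_false_iff.mpr hypy)
          | none =>
            have hnopy : ∀ y ∈ l, PySem.Str.endswith y ".py" = false := by
              intro y hy
              exact Bool.eq_false_iff.mpr
                (List.find?_eq_none.mp hf1 y (hperm.mem_iff.mpr hy))
            cases hf2 : s.find? (fun n => PySem.Str.endswith n ".sh") with
            | some r =>
              have hrmem : r ∈ l := hperm.mem_iff.mp (List.mem_of_find?_eq_some hf2)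
              have hrsh : PySem.Str.endswith r ".sh" = true := by simpa using List.find?_some hf2
              have hsufr : pvSuf r = 1 := pvSuf_one (hnopy r hrmem) hrsh
              refine (pv_alt_eq_some hrmem ?_).symm
              intro y hy
              rw [pvKey_le_iff]
              refine Or.inr ⟨(hpref3 r hrmem).trans (hpref3 y hy).symm, ?_⟩
              by_cases hysh : PySem.Str.endswith y ".sh" = true
              · refine Or.inr ⟨by rw [hsufr, pvSuf_one (hnopy y hy) hysh], ?_⟩
                exact pv_find_first hpair hf2 y (hperm.mem_iff.mpr hy) hysh
              · refine Or.inl ?_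
                rw [hsufr]
                exact pvSuf_gt_one (hnopy y hy) (Bool.eq_false_iff.mpr hysh)
            | none =>
              have hnosh : ∀ y ∈ l, PySem.Str.endswith y ".sh" = false := by
                intro y hy
                exact Bool.eq_false_iff.mpr
                  (List.find?_eq_none.mp hf2 y (hperm.mem_iff.mpr hy))
              cases hf3 : s.find? (fun n => PySem.Str.endswith n ".bash") with
              | some r =>
                have hrmem : r ∈ l := hperm.mem_iff.mp (List.mem_of_find?_eq_some hf3)
                have hrb : PySem.Str.endswith r ".bash" = true := by simpa using List.find?_some hf3
                refine (pv_alt_eq_some hrmem ?_).symm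
                intro y hy
                rw [pvKey_le_iff]
                refine Or.inr ⟨(hpref3 r hrmem).trans (hpref3 y hy).symm, ?_⟩
                by_cases hyb : PySem.Str.endswith y ".bash" = true
                · refine Or.inr ⟨by rw [pvSuf_two (hnopy r hrmem) (hnosh r hrmem) hrb,
                    pvSuf_two (hnopy y hy) (hnosh y hy) hyb], ?_⟩
                  exact pv_find_first hpair hf3 y (hperm.mem_iff.mpr hy) hyb
                · refine Or.inl ?_
                  rw [pvSuf_two (hnopy r hrmem) (hnosh r hrmem) hrb,
                    pvSuf_three (hnopy y hy) (hnosh y hy) (Bool.eq_false_iff.mpr hyb)]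
                  omega
              | none =>
                have hnob : ∀ y ∈ l, PySem.Str.endswith y ".bash" = false := by
                  intro y hy
                  exact Bool.eq_false_iff.mpr
                    (List.find?_eq_none.mp hf3 y (hperm.mem_iff.mpr hy))
                have hsne : s ≠ [] := by
                  intro h
                  rw [h] at hperm
                  exact hl hperm.symm.eq_nil
                obtain ⟨h0, t, hst⟩ := List.exists_cons_of_ne_nil hsne
                have hget : PySem.List.pyGet? s 0 = some h0 := by
                  rw [hst]
                  simp [PySem.List.pyGet?, PySem.List.pyIdx?]
                rw [hget]
                have hhmem : h0 ∈ l := hperm.mem_iff.mp (hst ▸ List.mem_cons_self ..)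
                refine (pv_alt_eq_some hhmem ?_).symm
                intro y hy
                rw [pvKey_le_iff]
                refine Or.inr ⟨(hpref3 h0 hhmem).trans (hpref3 y hy).symm, ?_⟩
                refine Or.inr ⟨by rw [pvSuf_three (hnopy h0 hhmem) (hnosh h0 hhmem) (hnob h0 hhmem),
                  pvSuf_three (hnopy y hy) (hnosh y hy) (hnob y hy)], ?_⟩
                have hys : y ∈ s := hperm.mem_iff.mpr hy
                rw [hst] at hys hpair
                rcases List.mem_cons.mp hys with rfl | hyt
                · exact le_refl _
                · exact (List.pairwise_cons.mp hpair).1 y hyt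

-- ===== VERDICT (by name: the statement is the Claim_ definition above) =====
theorem pick_entry_script_py_spec : Claim_equal_pick_entry_script_py := by
  intro l _
  unfold Spec_pick_entry_script_py
  exact pv_main l
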